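-- pv_equiv track=rewrite | github.com/elian204/sktr_for_long_traces | src/utils.py | get_run_context_labels_extended
-- ===== SOURCE A (Python) =====
-- from typing import (
--     Any, Callable, Dict, Iterable, List, Optional, Sequence, Tuple, Union
-- )
--
-- def get_run_context_labels_extended(
--     predicted_sequence: Sequence[str],
--     n_prev_labels: int = 1
-- ) -> Tuple[Optional[str], List[str]]:
--     """
--     Return the (current_run_label, list_of_previous_different_labels) from a predicted sequence.
--
--     - current_run_label: the label of the final contiguous run (i.e., last element).
--     - list_of_previous_different_labels: list of up to n_prev_labels most recent labels
--       that differ from the current run label AND from each other, ordered from most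
--       recent to oldest. If fewer than n_prev_labels are available, returns what's available.
--
--     Example:
--         sequence = ['A', 'B', 'B', 'C', 'C', 'C', 'D', 'D']
--         n_prev_labels = 3
--         Returns: ('D', ['C', 'B', 'A'])
--
--     Parameters
--     ----------
--     predicted_sequence : Sequence[str]
--         Sequence of predicted labels.
--     n_prev_labels : int, default 1
--         Number of previous different labels to extract.
--
--     Returns
--     -------
--     Tuple[Optional[str], List[str]]
--         (current_run_label, list_of_previous_different_labels)
--     """
--     if not predicted_sequence:
--         return None, []
--
--     current_label = predicted_sequence[-1]
--     previous_different_labels: List[str] = []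
--
--     # Walk backwards through the sequence, collecting labels different from current
--     # and different from each other
--     i = len(predicted_sequence) - 1
--     last_collected: Optional[str] = current_label
--
--     while i >= 0 and len(previous_different_labels) < n_prev_labels:
--         label = predicted_sequence[i]
--         if label != last_collected:
--             previous_different_labels.append(label)
--             last_collected = label
--         i -= 1
--
--     return current_label, previous_different_labels
-- ===== SOURCE B (Python) =====
-- def get_run_context_labels_extended(predicted_sequence, n_prev_labels=1):
--     # Forward run-compression, then take the previous runs from a reversed slice.
--     runs = []
--     for label in predicted_sequence:
--         if not runs or runs[-1] != label:
--             runs.append(label)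
--     if not runs:
--         return None, []
--     k = max(n_prev_labels, 0)
--     return runs[-1], list(reversed(runs[:-1]))[:k]
-- ===== Notes on version B (the rewrite author's own statement) =====
-- stated objective: idiomatic
-- what changed: Replaces the backward index-walking early-exit scan with a forward run-compression pass followed by a reversed slice truncated to max(n_prev_labels, 0).
import Mathlib
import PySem

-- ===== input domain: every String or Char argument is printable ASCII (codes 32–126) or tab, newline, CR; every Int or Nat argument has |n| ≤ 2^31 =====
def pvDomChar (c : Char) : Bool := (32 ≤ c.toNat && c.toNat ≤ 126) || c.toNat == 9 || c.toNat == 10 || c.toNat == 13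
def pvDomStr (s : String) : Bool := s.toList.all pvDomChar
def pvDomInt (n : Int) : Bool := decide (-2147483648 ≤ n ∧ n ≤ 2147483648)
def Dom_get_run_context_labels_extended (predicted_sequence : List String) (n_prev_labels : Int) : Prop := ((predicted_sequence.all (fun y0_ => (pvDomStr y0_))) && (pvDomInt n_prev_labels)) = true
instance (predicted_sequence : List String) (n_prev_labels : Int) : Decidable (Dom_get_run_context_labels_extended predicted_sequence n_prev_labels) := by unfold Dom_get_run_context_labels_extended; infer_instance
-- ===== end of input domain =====

-- A is re-implemented as a forward run-compression followed by a reversed slice (idiomatic decomposition); return values proved equal on all inputs.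


-- ===== PORT A =====
-- A's backward while-loop: j counts down (index processed at step j+1 is j), stopping
-- when j hits 0 or the accumulator reached n_prev_labels.
def aLoop (seq : List String) (n : Int) : Nat → List String → Option String → List String
  | 0, acc, _ => acc
  | j + 1, acc, last =>
    if (acc.length : Int) < n then
      match PySem.List.pyGet? seq (j : Int) with
      | some label =>
        if some label ≠ last then aLoop seq n j (acc ++ [label]) (some label)
        else aLoop seq n j acc last
      | none => acc    -- unreachable: j < len seq
    else acc

def get_run_context_labels_extended (predicted_sequence : List String) (n_prev_labels : Int) : Option String × List String :=
  if predicted_sequence = [] then (none, [])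
  else
    let current_label := PySem.List.pyGet? predicted_sequence (-1)
    (current_label, aLoop predicted_sequence n_prev_labels predicted_sequence.length [] current_label)

-- ===== PORT B =====
-- forward run-compression: append label whenever runs is empty or its last entry differs
def bRuns (predicted_sequence : List String) : List String :=
  predicted_sequence.foldl
    (fun runs label => if runs = [] ∨ runs.getLast? ≠ some label then runs ++ [label] else runs) []

def get_run_context_labels_extended_alt (predicted_sequence : List String) (n_prev_labels : Int) : Option String × List String :=
  let runs := bRuns predicted_sequence
  if runs = [] then (none, [])
  else
    let k := max n_prev_labels 0
    (PySem.List.pyGet? runs (-1), ((runs.dropLast).reverse).take k.toNat)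

-- ===== PRECONDITION & SPEC =====
def Spec_get_run_context_labels_extended (predicted_sequence : List String) (n_prev_labels : Int) (out : Option String × List String) : Prop := out = get_run_context_labels_extended_alt predicted_sequence n_prev_labels
instance (predicted_sequence : List String) (n_prev_labels : Int) (out : Option String × List String) : Decidable (Spec_get_run_context_labels_extended predicted_sequence n_prev_labels out) := by unfold Spec_get_run_context_labels_extended; infer_instance

-- ===== CLAIM (what is proved, stated in full; the proofs are below) =====
def Claim_equal_get_run_context_labels_extended : Prop := ∀ (predicted_sequence : List String) (n_prev_labels : Int), Dom_get_run_context_labels_extended predicted_sequence n_prev_labels → Spec_get_run_context_labels_extended predicted_sequence n_prev_labels (get_run_context_labels_extended predicted_sequence n_prev_labels)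

-- ===== LEMMAS AND PROOFS =====

-- Adjacent run-compression with an explicit "last kept" state.
def runsRec : Option String → List String → List String
  | _, [] => []
  | last, l :: rest => if some l = last then runsRec last rest else l :: runsRec (some l) rest

-- A's backward collection as a pure list recursion (on the reversed prefix).
def collect (n : Int) : List String → Option String → List String → List String
  | [], _, acc => acc
  | l :: rest, last, acc =>
    if (acc.length : Int) < n then
      if some l ≠ last then collect n rest (some l) (acc ++ [l]) else collect n rest last acc
    else acc

theorem bRuns_eq_runsRec_aux (xs : List String) : ∀ acc : List String,
    xs.foldl (fun runs label => if runs = [] ∨ runs.getLast? ≠ some label then runs ++ [label] else runs) acc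
      = acc ++ runsRec acc.getLast? xs := by
  induction xs with
  | nil => intro acc; simp [runsRec]
  | cons x rest ih =>
    intro acc
    by_cases h : acc.getLast? = some x
    · have hne : ¬ (acc = [] ∨ acc.getLast? ≠ some x) := by
        rintro (rfl | hne) <;> simp_all
      simp only [List.foldl_cons, if_neg hne, runsRec, if_pos h.symm]
      exact ih acc
    · have hc : acc = [] ∨ acc.getLast? ≠ some x := Or.inr h
      simp only [List.foldl_cons, if_pos hc, runsRec,
        if_neg (fun hh : some x = acc.getLast? => h hh.symm)]
      rw [ih (acc ++ [x])]
      simp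

theorem bRuns_eq (xs : List String) : bRuns xs = runsRec none xs := by
  simpa using bRuns_eq_runsRec_aux xs []

theorem aLoop_eq_collect (seq : List String) (n : Int) :
    ∀ (j : Nat), j ≤ seq.length → ∀ acc last,
      aLoop seq n j acc last = collect n ((seq.take j).reverse) last acc := by
  intro j
  induction j with
  | zero => intro _ acc last; simp [aLoop, collect]
  | succ j ih =>
    intro hj acc last
    have hjl : j < seq.length := by omega
    have hget : PySem.List.pyGet? seq (j : Int) = some seq[j] :=
      PySem.List.pyGet?_ofNat _ j hjl
    have htake : (seq.take (j + 1)).reverse = seq[j] :: (seq.take j).reverse := by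
      rw [List.take_add_one]
      simp [List.getElem?_eq_getElem hjl]
    rw [htake]
    by_cases hlen : (acc.length : Int) < n
    · by_cases heq : some seq[j] = last
      · simp only [aLoop, collect, hget, if_pos hlen]
        rw [if_neg (not_not_intro heq), if_neg (not_not_intro heq)]
        exact ih (by omega) acc last
      · simp only [aLoop, collect, hget, if_pos hlen, if_pos heq]
        exact ih (by omega) (acc ++ [seq[j]]) (some seq[j])
    · simp [aLoop, collect, hlen]

theorem collect_eq_take (n : Int) (xs : List String) :
    ∀ (last : Option String) (acc : List String),
      collect n xs last acc = acc ++ (runsRec last xs).take (n - acc.length).toNat := by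
  induction xs with
  | nil => intro last acc; simp [collect, runsRec]
  | cons l rest ih =>
    intro last acc
    by_cases hlen : (acc.length : Int) < n
    · by_cases heq : some l = last
      · simp only [collect, if_pos hlen, if_neg (not_not_intro heq), runsRec, if_pos heq]
        exact ih last acc
      · simp only [collect, if_pos hlen, if_pos heq, runsRec, if_neg heq]
        rw [ih (some l) (acc ++ [l])]
        have h1 : (n - acc.length).toNat = (n - (acc ++ [l]).length).toNat + 1 := by
          simp only [List.length_append, List.length_cons, List.length_nil]
          omega
        rw [h1]
        simp [List.take_succ_cons]
    · have h0 : (n - acc.length).toNat = 0 := by omega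
      simp [collect, if_neg hlen, h0]

-- the "current label" state of runsRec after a head match
theorem runsRec_some_head (a : String) (t : List String) :
    runsRec (some a) t = if t.head? = some a then (runsRec none t).tail else runsRec none t := by
  cases t with
  | nil => simp [runsRec]
  | cons b t' =>
    by_cases hb : b = a
    · subst hb
      simp [runsRec]
    · simp [runsRec, hb]

theorem runsRec_head (xs : List String) : (runsRec none xs).head? = xs.head? := by
  cases xs with
  | nil => simp [runsRec]
  | cons x t => simp [runsRec]

theorem getLast?_cons_or (y : String) (t : List String) :
    (y :: t).getLast? = t.getLast?.or (some y) := by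
  cases t with
  | nil => simp
  | cons a b =>
    rw [List.getLast?_cons_cons]
    cases h : (a :: b).getLast? with
    | none => simp [List.getLast?_eq_none_iff] at h
    | some v => simp

theorem runsRec_append_singleton (l : String) :
    ∀ (ys : List String) (last : Option String),
      runsRec last (ys ++ [l]) =
        runsRec last ys ++ (if ys.getLast?.or last = some l then [] else [l]) := by
  intro ys
  induction ys with
  | nil =>
    intro last
    by_cases h : last = some l
    · simp [runsRec, h]
    · have h2 : ¬ some l = last := fun hh => h hh.symm
      simp [runsRec, h, h2]
  | cons y t ih =>
    intro last
    rw [getLast?_cons_or]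
    by_cases hy : some y = last
    · simp only [List.cons_append, runsRec, if_pos hy]
      rw [ih last, ← hy]
      cases t.getLast? <;> simp
    · simp only [List.cons_append, runsRec, if_neg hy]
      rw [ih (some y)]
      cases t.getLast? <;> simp

-- run-compression commutes with reversal
theorem runsRec_reverse (xs : List String) :
    runsRec none xs.reverse = (runsRec none xs).reverse := by
  induction xs with
  | nil => simp [runsRec]
  | cons a t ih =>
    have h1 : (a :: t).reverse = t.reverse ++ [a] := by simp
    rw [h1, runsRec_append_singleton a t.reverse none, ih]
    have hst : t.reverse.getLast?.or none = t.head? := by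
      cases t with
      | nil => simp
      | cons b t' => simp
    rw [hst]
    simp only [runsRec]
    rw [runsRec_some_head a t]
    by_cases hh : t.head? = some a
    · have hhead : (runsRec none t).head? = some a := by rw [runsRec_head]; exact hh
      obtain ⟨z, zs, hz⟩ : ∃ z zs, runsRec none t = z :: zs := by
        cases hr : runsRec none t with
        | nil => rw [hr] at hhead; simp at hhead
        | cons z zs => exact ⟨z, zs, rfl⟩
      have hza : z = a := by rw [hz] at hhead; simpa using hhead
      rw [hz, hza, if_pos hh, if_pos hh]
      simp
    · rw [if_neg hh, if_neg hh]
      simp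

theorem runsRec_ne_nil (x : String) (t : List String) : runsRec none (x :: t) ≠ [] := by
  simp [runsRec]

theorem runsRec_getLast (xs : List String) : (runsRec none xs).getLast? = xs.getLast? := by
  rw [← List.head?_reverse, ← runsRec_reverse, runsRec_head, List.head?_reverse]

-- ===== VERDICT (by name: the statement is the Claim_ definition above) =====
theorem get_run_context_labels_extended_spec : Claim_equal_get_run_context_labels_extended := by
  intro seq n _
  unfold Spec_get_run_context_labels_extended
  unfold get_run_context_labels_extended get_run_context_labels_extended_alt
  cases seq with
  | nil => simp [bRuns]
  | cons x t =>
    rw [bRuns_eq]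
    have hne : (x :: t) ≠ [] := by simp
    have hrne : runsRec none (x :: t) ≠ [] := runsRec_ne_nil x t
    simp only [if_neg hne, if_neg hrne]
    -- first components
    have hfst : PySem.List.pyGet? (x :: t) (-1) = PySem.List.pyGet? (runsRec none (x :: t)) (-1) := by
      rw [PySem.List.pyGet?_neg_one, PySem.List.pyGet?_neg_one, runsRec_getLast]
    -- second components
    obtain ⟨c, hc⟩ : ∃ c, (x :: t).getLast? = some c := by
      cases hg : (x :: t).getLast? with
      | none => simp [List.getLast?_eq_none_iff] at hg
      | some c => exact ⟨c, rfl⟩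
    have hcur : PySem.List.pyGet? (x :: t) (-1) = some c := by rw [PySem.List.pyGet?_neg_one, hc]
    have hsnd : aLoop (x :: t) n (x :: t).length [] (PySem.List.pyGet? (x :: t) (-1))
        = ((runsRec none (x :: t)).dropLast.reverse).take (max n 0).toNat := by
      rw [hcur, aLoop_eq_collect (x :: t) n (x :: t).length (le_refl _),
        List.take_length, collect_eq_take]
      have hrevhead : (x :: t).reverse.head? = some c := by
        rw [List.head?_reverse]; exact hc
      rw [runsRec_some_head c (x :: t).reverse, if_pos hrevhead, runsRec_reverse]
      have htail : (runsRec none (x :: t)).reverse.tail = (runsRec none (x :: t)).dropLast.reverse := by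
        rw [List.tail_reverse]
      rw [htail]
      simp only [List.nil_append, List.length_nil, Int.natCast_zero]
      congr 1
      omega
    rw [hsnd, hfst]
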